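-- pv_equiv track=rewrite | github.com/kiernanlabs/zwiftpulse | racereport/management/commands/scrape_racereports.py | getFinishPositions
-- ===== SOURCE A (Python) =====
-- def getFinishPositions(sortP):
--     currCat = None
--     pos = 1
--     positions = []
--     for cat in sortP["Category"]:
--         if currCat != cat:
--             currCat = cat
--             pos = 1
--         positions += [pos]
--         pos += 1
--     return positions
-- ===== SOURCE B (Python) =====
-- def getFinishPositions(sortP):
--     # Run-length encode consecutive equal categories, then emit 1..n for each run.
--     cats = sortP["Category"]
--     runs = []
--     for c in cats:
--         if runs and runs[-1][0] == c:
--             runs[-1][1] += 1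
--         else:
--             runs.append([c, 1])
--     positions = []
--     for _, n in runs:
--         positions += range(1, n + 1)
--     return positions
-- ===== Notes on version B (the rewrite author's own statement) =====
-- stated objective: alternative
-- what changed: Replaces the running counter that resets on a category change with a two-pass scheme: run-length encode consecutive equal categories, then concatenate the ranges 1..n of each run.
import Mathlib
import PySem

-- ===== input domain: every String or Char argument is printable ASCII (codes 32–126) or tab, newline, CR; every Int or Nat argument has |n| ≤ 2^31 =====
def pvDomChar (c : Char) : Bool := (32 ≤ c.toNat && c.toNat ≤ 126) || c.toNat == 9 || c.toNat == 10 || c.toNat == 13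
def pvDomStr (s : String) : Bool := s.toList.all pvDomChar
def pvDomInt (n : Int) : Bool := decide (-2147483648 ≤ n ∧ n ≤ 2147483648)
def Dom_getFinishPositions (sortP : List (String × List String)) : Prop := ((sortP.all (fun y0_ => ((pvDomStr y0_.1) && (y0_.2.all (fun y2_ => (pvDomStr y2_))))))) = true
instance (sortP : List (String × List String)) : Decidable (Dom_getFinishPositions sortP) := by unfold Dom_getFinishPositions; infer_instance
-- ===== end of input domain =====

-- B re-implements getFinishPositions by run-length encoding consecutive equal categories
-- and concatenating the ranges 1..n of each run (alternative decomposition, same cost).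
-- Pre_ excludes dicts without a "Category" key, on which A raises KeyError.


-- ===== PORT A =====
-- loop state: (currCat, pos, positions)
def getFinishPositions (sortP : List (String × List String)) : List Int :=
  match sortP.lookup "Category" with
  | none => []   -- KeyError in Python; excluded by Pre_
  | some cats =>
    (cats.foldl (fun (st : Option String × Int × List Int) cat =>
        let st' := if st.1 ≠ some cat then (some cat, (1 : Int), st.2.2) else st
        (st'.1, st'.2.1 + 1, st'.2.2 ++ [st'.2.1])) (none, 1, [])).2.2

-- ===== PORT B =====
-- first pass: run-length encoding of consecutive equal categories
def pvRunsB (cats : List String) : List (String × Int) :=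
  cats.foldl (fun runs c =>
    match runs.getLast? with
    | some (c0, n) => if c0 = c then runs.dropLast ++ [(c0, n + 1)] else runs ++ [(c, 1)]
    | none => [(c, 1)]) []

def getFinishPositions_alt (sortP : List (String × List String)) : List Int :=
  match sortP.lookup "Category" with
  | none => []   -- KeyError in Python; excluded by Pre_
  | some cats =>
    (pvRunsB cats).foldl (fun positions r => positions ++ PySem.List.pyRange 1 (r.2 + 1) 1) []

-- ===== PRECONDITION & SPEC =====
-- A raises KeyError when "Category" is not a key of sortP; exactly those inputs are excluded.
def Pre_getFinishPositions (sortP : List (String × List String)) : Prop :=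
  (sortP.lookup "Category").isSome
instance (sortP : List (String × List String)) : Decidable (Pre_getFinishPositions sortP) := by unfold Pre_getFinishPositions; infer_instance
def pvWitness_getFinishPositions : (List (String × List String)) := [("Category", ["A", "A", "B"])]

def Spec_getFinishPositions (sortP : List (String × List String)) (out : List Int) : Prop := out = getFinishPositions_alt sortP
instance (sortP : List (String × List String)) (out : List Int) : Decidable (Spec_getFinishPositions sortP out) := by unfold Spec_getFinishPositions; infer_instance

-- ===== CLAIM (what is proved, stated in full; the proofs are below) =====
def Claim_equal_getFinishPositions : Prop := ∀ (sortP : List (String × List String)), Dom_getFinishPositions sortP → Pre_getFinishPositions sortP → Spec_getFinishPositions sortP (getFinishPositions sortP)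

-- ===== LEMMAS AND PROOFS =====

-- emit the ranges of a run list
def pvEmit (runs : List (String × Int)) : List Int :=
  runs.foldl (fun positions r => positions ++ PySem.List.pyRange 1 (r.2 + 1) 1) []

theorem pvEmit_eq_flatMap (runs : List (String × Int)) :
    pvEmit runs = runs.flatMap (fun r => PySem.List.pyRange 1 (r.2 + 1) 1) := by
  simpa [pvEmit] using
    PySem.List.foldl_append_eq_flatMap (fun r : String × Int => PySem.List.pyRange 1 (r.2 + 1) 1) runs []

theorem pvEmit_append (runs : List (String × Int)) (r : String × Int) :
    pvEmit (runs ++ [r]) = pvEmit runs ++ PySem.List.pyRange 1 (r.2 + 1) 1 := by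
  simp [pvEmit_eq_flatMap]

-- the invariant connecting A's loop state to B's run list
theorem pv_loop_eq (cats : List String) (runs : List (String × Int)) (c0 : String) (n : Int)
    (hn : 1 ≤ n)
    (hlast : (runs.dropLast ++ [(c0, n)] : List (String × Int)) = runs) :
    (cats.foldl (fun (st : Option String × Int × List Int) cat =>
        let st' := if st.1 ≠ some cat then (some cat, (1 : Int), st.2.2) else st
        (st'.1, st'.2.1 + 1, st'.2.2 ++ [st'.2.1])) (some c0, n + 1, pvEmit runs)).2.2
      = pvEmit (cats.foldl (fun runs c =>
          match runs.getLast? with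
          | some (c0, n) => if c0 = c then runs.dropLast ++ [(c0, n + 1)] else runs ++ [(c, 1)]
          | none => [(c, 1)]) runs) := by
  induction cats generalizing runs c0 n with
  | nil => rfl
  | cons c rest ih =>
    have hlast' : runs.getLast? = some (c0, n) := by
      rw [← hlast]; simp
    by_cases hc : c0 = c
    · subst hc
      have hemit : pvEmit (runs.dropLast ++ [(c0, n + 1)]) = pvEmit runs ++ [n + 1] := by
        have hr : PySem.List.pyRange 1 (n + 1 + 1) 1 = PySem.List.pyRange 1 (n + 1) 1 ++ [n + 1] :=
          PySem.List.pyRange_one_succ_right (by omega)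
        rw [pvEmit_append runs.dropLast (c0, n + 1)]
        conv_rhs => rw [← hlast, pvEmit_append runs.dropLast (c0, n)]
        simp [hr]
      have key := ih (runs.dropLast ++ [(c0, n + 1)]) c0 (n + 1) (by omega) (by simp)
      rw [hemit] at key
      simp only [List.foldl_cons, hlast']
      simpa using key
    · have hemit : pvEmit (runs ++ [(c, 1)]) = pvEmit runs ++ [1] := by
        rw [pvEmit_append]
        have h1 : PySem.List.pyRange 1 ((1:Int) + 1) 1 = [1] := PySem.List.pyRange_one_singleton 1
        norm_num at h1
        simp [h1]
      have key := ih (runs ++ [(c, 1)]) c 1 le_rfl (by simp)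
      rw [hemit] at key
      simp only [List.foldl_cons, hlast', if_neg hc]
      have hne : ((some c0 : Option String) ≠ some c) := by simp [hc]
      simpa [hne] using key

-- ===== VERDICT (by name: the statement is the Claim_ definition above) =====
theorem getFinishPositions_spec : Claim_equal_getFinishPositions := by
  intro sortP _ hpre
  unfold Spec_getFinishPositions getFinishPositions getFinishPositions_alt
  cases hcat : sortP.lookup "Category" with
  | none => simp [Pre_getFinishPositions, hcat] at hpre
  | some cats =>
    show _ = pvEmit (pvRunsB cats)
    cases cats with
    | nil => rfl
    | cons c rest =>
      unfold pvRunsB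
      simp only [List.foldl_cons]
      have h0 : pvEmit [(c, (1:Int))] = [1] := by
        have h1 : PySem.List.pyRange 1 ((1:Int) + 1) 1 = [1] := PySem.List.pyRange_one_singleton 1
        norm_num at h1
        simp [pvEmit, h1]
      have key := pv_loop_eq rest [(c, 1)] c 1 le_rfl (by simp)
      rw [h0] at key
      simpa using key
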